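-- pv_equiv track=rewrite | github.com/hyperpolymath/proven | bindings/python/proven/safe_password.py | has_sequential
-- ===== SOURCE A (Python) =====
-- def has_sequential(password: str, length: int = 3) -> bool:
--     """
--     Check if password contains sequential characters.
--
--     Args:
--         password: The password to check
--         length: Minimum sequence length to detect
--
--     Returns:
--         True if sequential pattern found
--     """
--     if len(password) < length:
--         return False
--
--     for i in range(len(password) - length + 1):
--         substr = password[i:i + length]
--         # Check ascending sequence
--         if all(ord(substr[j + 1]) == ord(substr[j]) + 1 for j in range(length - 1)):
--             return True
--         # Check descending sequence
--         if all(ord(substr[j + 1]) == ord(substr[j]) - 1 for j in range(length - 1)):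
--             return True
--
--     return False
-- ===== SOURCE B (Python) =====
-- def has_sequential(password: str, length: int = 3) -> bool:
--     """Single pass: track the running ascending/descending run lengths."""
--     if len(password) < length:
--         return False
--     if length <= 1:
--         return True
--     asc = desc = 1
--     prev = password[0]
--     for ch in password[1:]:
--         d = ord(ch) - ord(prev)
--         asc = asc + 1 if d == 1 else 1
--         desc = desc + 1 if d == -1 else 1
--         if asc >= length or desc >= length:
--             return True
--         prev = ch
--     return False
-- ===== Notes on version B (the rewrite author's own statement) =====
-- stated objective: faster
-- what changed: Replaced the window scan (for every start index, slice the string and re-check all length-1 adjacent pairs) by a single left-to-right pass that keeps running ascending/descending run counters over consecutive ord differences.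
import Mathlib
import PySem

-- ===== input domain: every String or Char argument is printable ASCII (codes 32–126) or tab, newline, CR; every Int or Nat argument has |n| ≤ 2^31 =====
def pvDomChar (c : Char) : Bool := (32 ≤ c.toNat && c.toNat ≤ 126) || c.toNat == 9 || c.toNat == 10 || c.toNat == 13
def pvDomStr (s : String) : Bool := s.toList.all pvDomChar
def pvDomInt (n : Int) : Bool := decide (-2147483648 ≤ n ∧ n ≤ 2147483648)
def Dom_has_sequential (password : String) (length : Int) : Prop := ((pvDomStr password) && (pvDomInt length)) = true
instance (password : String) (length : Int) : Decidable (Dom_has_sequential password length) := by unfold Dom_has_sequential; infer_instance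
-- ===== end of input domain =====

-- B replaces A's per-start-index window re-scan by one pass tracking running
-- ascending/descending run counters over consecutive character-code differences.


-- ===== PORT A =====
-- all(ord(substr[j+1]) == ord(substr[j]) + 1 for j in range(length - 1))
def pvAscAll (substr : List Char) (length : Int) : Bool :=
  (PySem.List.pyRange 0 (length - 1)).all (fun j =>
    decide (((PySem.List.pyGetD substr (j + 1) 'a').toNat : Int)
            = ((PySem.List.pyGetD substr j 'a').toNat : Int) + 1))

-- all(ord(substr[j+1]) == ord(substr[j]) - 1 for j in range(length - 1))
def pvDescAll (substr : List Char) (length : Int) : Bool :=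
  (PySem.List.pyRange 0 (length - 1)).all (fun j =>
    decide (((PySem.List.pyGetD substr (j + 1) 'a').toNat : Int)
            = ((PySem.List.pyGetD substr j 'a').toNat : Int) - 1))

def has_sequential (password : String) (length : Int) : Bool :=
  let cs := password.toList
  if (cs.length : Int) < length then false
  else
    (PySem.List.pyRange 0 ((cs.length : Int) - length + 1)).any (fun i =>
      let substr := PySem.List.slice cs (some i) (some (i + length))
      pvAscAll substr length || pvDescAll substr length)

-- ===== PORT B =====
-- the single-pass loop of Source B: prev is the previous char, asc/desc the running run counters
def pvBLoop (length asc desc : Int) (prev : Char) : List Char → Bool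
  | [] => false
  | c :: rest =>
    let d : Int := (c.toNat : Int) - (prev.toNat : Int)
    let asc' := if d = 1 then asc + 1 else 1
    let desc' := if d = -1 then desc + 1 else 1
    if length ≤ asc' ∨ length ≤ desc' then true
    else pvBLoop length asc' desc' c rest

def has_sequential_alt (password : String) (length : Int) : Bool :=
  let cs := password.toList
  if (cs.length : Int) < length then false
  else if length ≤ 1 then true
  else
    match cs with
    | [] => false
    | p :: rest => pvBLoop length 1 1 p rest

-- ===== PRECONDITION & SPEC =====
def Spec_has_sequential (password : String) (length : Int) (out : Bool) : Prop := out = has_sequential_alt password length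
instance (password : String) (length : Int) (out : Bool) : Decidable (Spec_has_sequential password length out) := by unfold Spec_has_sequential; infer_instance

-- ===== CLAIM (what is proved, stated in full; the proofs are below) =====
def Claim_equal_has_sequential : Prop := ∀ (password : String) (length : Int), Dom_has_sequential password length → Spec_has_sequential password length (has_sequential password length)

-- ===== LEMMAS AND PROOFS =====

-- consecutive character-code differences of a char list
def pvDiffs : List Char → List Int
  | [] => []
  | [_] => []
  | a :: b :: t => ((b.toNat : Int) - (a.toNat : Int)) :: pvDiffs (b :: t)

-- a run of m copies of v starting at index i of ds
def pvRun (ds : List Int) (v : Int) (i m : Nat) : Prop :=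
  i + m ≤ ds.length ∧ ∀ j < m, ds.getD (i + j) 0 = v

-- a prefix run of v's long enough to push the running counter cnt up to length
def pvHitP (ds : List Int) (length v cnt : Int) : Prop :=
  ∃ m : Nat, 1 ≤ m ∧ m ≤ ds.length ∧ (∀ j < m, ds.getD j 0 = v) ∧ length ≤ cnt + (m : Int)
-- a full fresh run of v's starting strictly after the prefix
def pvHitT (ds : List Int) (length v : Int) : Prop :=
  ∃ i : Nat, 1 ≤ i ∧ pvRun ds v i (length - 1).toNat
-- what pvBLoop detects, expressed on the diff list
def pvHit (ds : List Int) (length a d : Int) : Prop :=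
  (pvHitP ds length 1 a ∨ pvHitT ds length 1) ∨ (pvHitP ds length (-1) d ∨ pvHitT ds length (-1))

lemma pvDiffs_cons (a b : Char) (t : List Char) :
    pvDiffs (a :: b :: t) = ((b.toNat : Int) - (a.toNat : Int)) :: pvDiffs (b :: t) := rfl

lemma pvDiffs_length : ∀ (a : Char) (t : List Char), (pvDiffs (a :: t)).length = t.length
  | _, [] => rfl
  | a, b :: t => by simp [pvDiffs_cons, pvDiffs_length b t]

lemma pvDiffs_getD : ∀ (a : Char) (t : List Char) (k : Nat), k < t.length →
    (pvDiffs (a :: t)).getD k 0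
      = (((a :: t).getD (k + 1) 'a').toNat : Int) - (((a :: t).getD k 'a').toNat : Int)
  | a, [], k, hk => by simp at hk
  | a, b :: t, 0, hk => by simp [pvDiffs_cons]
  | a, b :: t, k + 1, hk => by
      simp only [pvDiffs_cons, List.getD_cons_succ]
      exact pvDiffs_getD b t k (by simpa using hk)

lemma pvRun_cons (x : Int) (ds : List Int) (v : Int) (i m : Nat) :
    pvRun (x :: ds) v (i + 1) m ↔ pvRun ds v i m := by
  unfold pvRun
  constructor
  · rintro ⟨h1, h2⟩
    refine ⟨by simp at h1; omega, fun j hj => ?_⟩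
    have := h2 j hj
    rw [show i + 1 + j = (i + j) + 1 from by omega, List.getD_cons_succ] at this
    exact this
  · rintro ⟨h1, h2⟩
    refine ⟨by simp; omega, fun j hj => ?_⟩
    rw [show i + 1 + j = (i + j) + 1 from by omega, List.getD_cons_succ]
    exact h2 j hj

lemma pvRun_mono (ds : List Int) (v : Int) (i m m' : Nat) (h : m' ≤ m) :
    pvRun ds v i m → pvRun ds v i m' := by
  rintro ⟨h1, h2⟩
  exact ⟨by omega, fun j hj => h2 j (by omega)⟩

-- one step of the loop, for one direction (v = 1 or v = -1) with counter cnt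
lemma pvSide_step (ds : List Int) (d0 length v cnt : Int) (hl : 2 ≤ length) (hc : 1 ≤ cnt) :
    (pvHitP (d0 :: ds) length v cnt ∨ pvHitT (d0 :: ds) length v)
      ↔ length ≤ (if d0 = v then cnt + 1 else 1)
        ∨ (pvHitP ds length v (if d0 = v then cnt + 1 else 1) ∨ pvHitT ds length v) := by
  have hlm1 : 1 ≤ (length - 1).toNat := by omega
  set cnt' := (if d0 = v then cnt + 1 else 1) with hcnt'
  unfold pvHitP pvHitT
  constructor
  · rintro (⟨m, h1, h2, h3, h4⟩ | ⟨i, hi, hr⟩)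
    · have h0 : d0 = v := by have := h3 0 (by omega); simpa using this
      obtain ⟨m', rfl⟩ : ∃ m', m = m' + 1 := ⟨m - 1, by omega⟩
      rcases Nat.eq_zero_or_pos m' with rfl | hm'
      · left; rw [hcnt', if_pos h0]; push_cast at h4; omega
      · right; left
        refine ⟨m', hm', by simp at h2; omega, fun j hj => ?_, ?_⟩
        · have := h3 (j + 1) (by omega); simpa using this
        · rw [hcnt', if_pos h0]; push_cast at h4 ⊢; omega
    · obtain ⟨i', rfl⟩ : ∃ i', i = i' + 1 := ⟨i - 1, by omega⟩
      rw [pvRun_cons] at hr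
      rcases Nat.eq_zero_or_pos i' with rfl | hi'
      · right; left
        obtain ⟨hr1, hr2⟩ := hr
        exact ⟨(length - 1).toNat, hlm1, by omega, fun j hj => by simpa using hr2 j hj, by omega⟩
      · right; right; exact ⟨i', hi', hr⟩
  · rintro (h | ⟨m, h1, h2, h3, h4⟩ | ⟨i, hi, hr⟩)
    · by_cases h0 : d0 = v
      · left
        refine ⟨1, le_refl 1, by simp, fun j hj => ?_, ?_⟩
        · interval_cases j
          simpa using h0
        · rw [hcnt', if_pos h0] at h; push_cast; omega
      · rw [hcnt', if_neg h0] at h; omega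
    · by_cases h0 : d0 = v
      · left
        refine ⟨m + 1, by omega, by simp; omega, fun j hj => ?_, ?_⟩
        · cases j with
          | zero => simpa using h0
          | succ j' => simpa using h3 j' (by omega)
        · rw [hcnt', if_pos h0] at h4; push_cast at h4 ⊢; omega
      · right
        rw [hcnt', if_neg h0] at h4
        refine ⟨1, le_refl 1, ?_⟩
        rw [pvRun_cons]
        refine pvRun_mono ds v 0 m _ (by omega) ⟨by omega, fun j hj => by simpa using h3 j hj⟩
    · right; exact ⟨i + 1, by omega, (pvRun_cons d0 ds v i _).mpr hr⟩

lemma pvHit_step (ds : List Int) (d0 length a d : Int)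
    (hl : 2 ≤ length) (ha : 1 ≤ a) (hd : 1 ≤ d) :
    pvHit (d0 :: ds) length a d ↔
      ((length ≤ (if d0 = 1 then a + 1 else 1)) ∨ (length ≤ (if d0 = -1 then d + 1 else 1)))
      ∨ pvHit ds length (if d0 = 1 then a + 1 else 1) (if d0 = -1 then d + 1 else 1) := by
  unfold pvHit
  rw [pvSide_step ds d0 length 1 a hl ha, pvSide_step ds d0 length (-1) d hl hd]
  tauto

lemma pvBLoop_iff (length : Int) (hl : 2 ≤ length) :
    ∀ (cs : List Char) (a d : Int) (prev : Char), 1 ≤ a → 1 ≤ d →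
      (pvBLoop length a d prev cs = true ↔ pvHit (pvDiffs (prev :: cs)) length a d)
  | [], a, d, prev, ha, hd => by
      have hlm : 1 ≤ (length - 1).toNat := by omega
      simp only [pvBLoop, pvDiffs]
      constructor
      · intro h; exact absurd h (by simp)
      · rintro ((⟨m, h1, h2, _⟩ | ⟨i, hi, h1, _⟩) | (⟨m, h1, h2, _⟩ | ⟨i, hi, h1, _⟩)) <;>
          simp_all
  | c :: rest, a, d, prev, ha, hd => by
      rw [pvDiffs_cons, pvHit_step _ _ _ _ _ hl ha hd]
      have ha' : (1 : Int) ≤ (if ((c.toNat : Int) - (prev.toNat : Int)) = 1 then a + 1 else 1) := by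
        split <;> omega
      have hd' : (1 : Int) ≤ (if ((c.toNat : Int) - (prev.toNat : Int)) = -1 then d + 1 else 1) := by
        split <;> omega
      simp only [pvBLoop]
      by_cases h : (length ≤ (if ((c.toNat : Int) - (prev.toNat : Int)) = 1 then a + 1 else 1)
          ∨ length ≤ (if ((c.toNat : Int) - (prev.toNat : Int)) = -1 then d + 1 else 1))
      · rw [if_pos h]
        simp only [true_iff]
        exact Or.inl h
      · rw [if_neg h, pvBLoop_iff length hl rest _ _ c ha' hd']
        constructor
        · exact Or.inr
        · rintro (hh | hh)
          · exact absurd hh h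
          · exact hh

-- with the counter at 1, a side hit is exactly "some run of length-1 v's somewhere"
lemma pvSide_one (ds : List Int) (length v : Int) (hl : 2 ≤ length) :
    (pvHitP ds length v 1 ∨ pvHitT ds length v) ↔ ∃ i : Nat, pvRun ds v i (length - 1).toNat := by
  have hlm : ((length - 1).toNat : Int) = length - 1 := by omega
  unfold pvHitP pvHitT
  constructor
  · rintro (⟨m, h1, h2, h3, h4⟩ | ⟨i, hi, hr⟩)
    · exact ⟨0, pvRun_mono ds v 0 m _ (by omega) ⟨by omega, fun j hj => by simpa using h3 j hj⟩⟩
    · exact ⟨i, hr⟩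
  · rintro ⟨i, hr⟩
    rcases Nat.eq_zero_or_pos i with rfl | hi
    · obtain ⟨h1, h2⟩ := hr
      exact Or.inl ⟨(length - 1).toNat, by omega, by omega, fun j hj => by simpa using h2 j hj, by omega⟩
    · exact Or.inr ⟨i, hi, hr⟩

-- A's per-window check equals a run in the diff list (window fully inside the string)
lemma pvAscAll_iff (cs : List Char) (L i : Nat) (hL : 2 ≤ L) (hw : i + L ≤ cs.length) :
    pvAscAll (PySem.List.slice cs (some (i : Int)) (some ((i : Int) + (L : Int)))) (L : Int) = true
      ↔ pvRun (pvDiffs cs) 1 i (((L : Int) - 1).toNat) := by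
  rcases cs with _ | ⟨a, t⟩
  · simp at hw; omega
  · have hlm : (((L : Int) - 1).toNat) = L - 1 := by omega
    rw [PySem.List.slice_natCast_add]
    set sub := List.take L (List.drop i (a :: t)) with hsub
    have hsublen : sub.length = L := by simp [hsub]; simp at hw; omega
    have hget : ∀ j, j < L → sub.getD j 'a' = (a :: t).getD (i + j) 'a' := by
      intro j hj
      have h1 : j < sub.length := by omega
      have h2 : i + j < (a :: t).length := by simp at hw ⊢; omega
      rw [List.getD_eq_getElem _ 'a' h1, List.getD_eq_getElem _ 'a' h2]
      simp [hsub, List.getElem_take, List.getElem_drop]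
    have hall : pvAscAll sub (L : Int) = true
        ↔ ∀ k : Nat, k < L - 1 → ((sub.getD (k + 1) 'a').toNat : Int) = ((sub.getD k 'a').toNat : Int) + 1 := by
      unfold pvAscAll
      rw [List.all_eq_true]
      constructor
      · intro h k hk
        have hmem : ((k : Int)) ∈ PySem.List.pyRange 0 ((L : Int) - 1) :=
          PySem.List.mem_pyRange_one.mpr ⟨by omega, by omega⟩
        have := h _ hmem
        rw [show ((k : Int) + 1) = (((k + 1 : Nat)) : Int) from by push_cast; ring,
            PySem.List.pyGetD_natCast, PySem.List.pyGetD_natCast] at this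
        exact of_decide_eq_true this
      · intro h x hx
        obtain ⟨hx0, hx1⟩ := PySem.List.mem_pyRange_one.mp hx
        obtain ⟨k, rfl⟩ : ∃ k : Nat, x = (k : Int) := ⟨x.toNat, by omega⟩
        rw [show ((k : Int) + 1) = (((k + 1 : Nat)) : Int) from by push_cast; ring,
            PySem.List.pyGetD_natCast, PySem.List.pyGetD_natCast]
        exact decide_eq_true (h k (by omega))
    rw [hall, hlm]
    unfold pvRun
    rw [pvDiffs_length]
    simp only [List.length_cons] at hw
    constructor
    · intro h
      refine ⟨by omega, fun j hj => ?_⟩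
      rw [pvDiffs_getD a t (i + j) (by omega)]
      have := h j (by omega)
      rw [hget (j + 1) (by omega), hget j (by omega)] at this
      rw [show i + j + 1 = i + (j + 1) from by omega]
      omega
    · rintro ⟨h1, h2⟩ j hj
      have := h2 j hj
      rw [pvDiffs_getD a t (i + j) (by omega)] at this
      rw [hget (j + 1) (by omega), hget j (by omega)]
      rw [show i + j + 1 = i + (j + 1) from by omega] at this
      omega

lemma pvDescAll_iff (cs : List Char) (L i : Nat) (hL : 2 ≤ L) (hw : i + L ≤ cs.length) :
    pvDescAll (PySem.List.slice cs (some (i : Int)) (some ((i : Int) + (L : Int)))) (L : Int) = true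
      ↔ pvRun (pvDiffs cs) (-1) i (((L : Int) - 1).toNat) := by
  rcases cs with _ | ⟨a, t⟩
  · simp at hw; omega
  · have hlm : (((L : Int) - 1).toNat) = L - 1 := by omega
    rw [PySem.List.slice_natCast_add]
    set sub := List.take L (List.drop i (a :: t)) with hsub
    have hsublen : sub.length = L := by simp [hsub]; simp at hw; omega
    have hget : ∀ j, j < L → sub.getD j 'a' = (a :: t).getD (i + j) 'a' := by
      intro j hj
      have h1 : j < sub.length := by omega
      have h2 : i + j < (a :: t).length := by simp at hw ⊢; omega
      rw [List.getD_eq_getElem _ 'a' h1, List.getD_eq_getElem _ 'a' h2]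
      simp [hsub, List.getElem_take, List.getElem_drop]
    have hall : pvDescAll sub (L : Int) = true
        ↔ ∀ k : Nat, k < L - 1 → ((sub.getD (k + 1) 'a').toNat : Int) = ((sub.getD k 'a').toNat : Int) - 1 := by
      unfold pvDescAll
      rw [List.all_eq_true]
      constructor
      · intro h k hk
        have hmem : ((k : Int)) ∈ PySem.List.pyRange 0 ((L : Int) - 1) :=
          PySem.List.mem_pyRange_one.mpr ⟨by omega, by omega⟩
        have := h _ hmem
        rw [show ((k : Int) + 1) = (((k + 1 : Nat)) : Int) from by push_cast; ring,
            PySem.List.pyGetD_natCast, PySem.List.pyGetD_natCast] at this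
        exact of_decide_eq_true this
      · intro h x hx
        obtain ⟨hx0, hx1⟩ := PySem.List.mem_pyRange_one.mp hx
        obtain ⟨k, rfl⟩ : ∃ k : Nat, x = (k : Int) := ⟨x.toNat, by omega⟩
        rw [show ((k : Int) + 1) = (((k + 1 : Nat)) : Int) from by push_cast; ring,
            PySem.List.pyGetD_natCast, PySem.List.pyGetD_natCast]
        exact decide_eq_true (h k (by omega))
    rw [hall, hlm]
    unfold pvRun
    rw [pvDiffs_length]
    simp only [List.length_cons] at hw
    constructor
    · intro h
      refine ⟨by omega, fun j hj => ?_⟩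
      rw [pvDiffs_getD a t (i + j) (by omega)]
      have := h j (by omega)
      rw [hget (j + 1) (by omega), hget j (by omega)] at this
      rw [show i + j + 1 = i + (j + 1) from by omega]
      omega
    · rintro ⟨h1, h2⟩ j hj
      have := h2 j hj
      rw [pvDiffs_getD a t (i + j) (by omega)] at this
      rw [hget (j + 1) (by omega), hget j (by omega)]
      rw [show i + j + 1 = i + (j + 1) from by omega] at this
      omega

-- ===== VERDICT (by name: the statement is the Claim_ definition above) =====
theorem has_sequential_spec : Claim_equal_has_sequential := by
  intro password length _
  unfold Spec_has_sequential
  show has_sequential password length = has_sequential_alt password length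
  simp only [has_sequential, has_sequential_alt]
  generalize password.toList = cs
  by_cases h1 : ((cs.length : Int)) < length
  · rw [if_pos h1, if_pos h1]
  · rw [if_neg h1, if_neg h1]
    by_cases h2 : length ≤ 1
    · rw [if_pos h2]
      have hK : (0 : Int) < (cs.length : Int) - length + 1 := by omega
      rw [PySem.List.pyRange_one_cons hK, List.any_cons]
      have hnil : PySem.List.pyRange 0 (length - 1) = [] :=
        PySem.List.pyRange_one_eq_nil (by omega)
      simp [pvAscAll, hnil]
    · rw [if_neg h2]
      obtain ⟨L, rfl⟩ : ∃ L : Nat, length = (L : Int) := ⟨length.toNat, by omega⟩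
      have hL : 2 ≤ L := by omega
      have hl2 : (2 : Int) ≤ (L : Int) := by omega
      rcases cs with _ | ⟨p, rest⟩
      · simp at h1; omega
      · have hB : pvBLoop (L : Int) 1 1 p rest = true
            ↔ (∃ i : Nat, pvRun (pvDiffs (p :: rest)) 1 i (((L : Int) - 1).toNat))
              ∨ (∃ i : Nat, pvRun (pvDiffs (p :: rest)) (-1) i (((L : Int) - 1).toNat)) := by
          rw [pvBLoop_iff (L : Int) hl2 rest 1 1 p (le_refl 1) (le_refl 1)]
          unfold pvHit
          rw [pvSide_one _ _ 1 hl2, pvSide_one _ _ (-1) hl2]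
        have hA : ((PySem.List.pyRange 0 (((p :: rest).length : Int) - (L : Int) + 1)).any fun i =>
              pvAscAll (PySem.List.slice (p :: rest) (some i) (some (i + (L : Int)))) (L : Int)
                || pvDescAll (PySem.List.slice (p :: rest) (some i) (some (i + (L : Int)))) (L : Int)) = true
            ↔ (∃ i : Nat, pvRun (pvDiffs (p :: rest)) 1 i (((L : Int) - 1).toNat))
              ∨ (∃ i : Nat, pvRun (pvDiffs (p :: rest)) (-1) i (((L : Int) - 1).toNat)) := by
          rw [List.any_eq_true, ← exists_or]
          constructor
          · rintro ⟨x, hx, hf⟩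
            obtain ⟨hx0, hx1⟩ := PySem.List.mem_pyRange_one.mp hx
            obtain ⟨iN, rfl⟩ : ∃ k : Nat, x = (k : Int) := ⟨x.toNat, by omega⟩
            have hwin : iN + L ≤ (p :: rest).length := by
              simp only [List.length_cons] at hx1 ⊢; omega
            rcases (Bool.or_eq_true _ _).mp hf with hf | hf
            · exact ⟨iN, Or.inl ((pvAscAll_iff _ L iN hL hwin).mp hf)⟩
            · exact ⟨iN, Or.inr ((pvDescAll_iff _ L iN hL hwin).mp hf)⟩
          · rintro ⟨i, hr⟩
            have hwin : i + L ≤ (p :: rest).length := by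
              rcases hr with ⟨hb, _⟩ | ⟨hb, _⟩ <;>
                · rw [pvDiffs_length] at hb
                  simp only [List.length_cons]
                  omega
            refine ⟨(i : Int), PySem.List.mem_pyRange_one.mpr ⟨by omega, ?_⟩, ?_⟩
            · simp only [List.length_cons] at hwin ⊢; omega
            · rcases hr with hr | hr
              · exact (Bool.or_eq_true _ _).mpr (Or.inl ((pvAscAll_iff _ L i hL hwin).mpr hr))
              · exact (Bool.or_eq_true _ _).mpr (Or.inr ((pvDescAll_iff _ L i hL hwin).mpr hr))
        rw [Bool.eq_iff_iff, hA, hB]
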